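-- pv_equiv track=rewrite | github.com/ykmyk/Projects-in-university-years | courseAssignments/IntroductionToMachineLearning/07/isnt_it_ironic.py | has_inner_uppercase
-- ===== SOURCE A (Python) =====
-- def has_inner_uppercase(text: str) -> bool:
--     """Return True if any token contains an uppercase letter
--     after its first character."""
--     for token in text.split():
--         # Skip empty tokens just in case
--         if len(token) <= 1:
--             continue
--         # Check characters from index 1 onwards
--         for ch in token[1:]:
--             if ch.isupper():
--                 return True
--     return False
-- ===== SOURCE B (Python) =====
-- def has_inner_uppercase(text: str) -> bool:
--     """Return True if any whitespace-delimited token contains an uppercase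
--     letter after its first character (single pass, no token list)."""
--     at_token_start = True
--     for ch in text:
--         if ch.isspace():
--             at_token_start = True
--         elif (not at_token_start) and ch.isupper():
--             return True
--         else:
--             at_token_start = False
--     return False
-- ===== Notes on version B (the rewrite author's own statement) =====
-- stated objective: alternative
-- what changed: Replaced split()-then-nested-token-loops with a single pass over the raw characters that maintains an at_token_start flag, never building the token list (same asymptotic cost; trades C-level split for a per-character scan).
import Mathlib
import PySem

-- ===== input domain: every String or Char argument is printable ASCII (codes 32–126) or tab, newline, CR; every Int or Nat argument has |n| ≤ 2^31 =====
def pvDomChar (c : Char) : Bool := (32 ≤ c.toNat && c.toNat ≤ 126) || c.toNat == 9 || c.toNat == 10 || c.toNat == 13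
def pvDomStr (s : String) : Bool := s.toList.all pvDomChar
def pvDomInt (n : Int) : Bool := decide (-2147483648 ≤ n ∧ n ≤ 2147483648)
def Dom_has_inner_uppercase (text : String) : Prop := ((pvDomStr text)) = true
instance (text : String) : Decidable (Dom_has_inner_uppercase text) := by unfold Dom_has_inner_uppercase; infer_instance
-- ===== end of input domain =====

-- B replaces split()-then-nested-loops by a single character pass with an at_token_start flag (alternative decomposition, same cost).


-- ===== PORT A =====
-- inner loop: 'for ch in token[1:]: if ch.isupper(): return True'
def aScan : List Char → Bool
  | [] => false
  | c :: cs => if PySem.Chars.isupper c then true else aScan cs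

-- outer loop: 'for token in text.split(): …'
def aLoop : List String → Bool
  | [] => false
  | t :: ts =>
    if PySem.Str.len t ≤ 1 then aLoop ts
    else if aScan (PySem.Str.slice t (some 1) none).toList then true
    else aLoop ts

def has_inner_uppercase (text : String) : Bool := aLoop (PySem.Str.split₀ text)

-- ===== PORT B =====
-- single pass with the at_token_start flag
def bGo : List Char → Bool → Bool
  | [], _ => false
  | c :: cs, atStart =>
    if PySem.Chars.isspace c then bGo cs true
    else if !atStart && PySem.Chars.isupper c then true
    else bGo cs false

def has_inner_uppercase_alt (text : String) : Bool := bGo text.toList true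

-- ===== PRECONDITION & SPEC =====
def Spec_has_inner_uppercase (text : String) (out : Bool) : Prop := out = has_inner_uppercase_alt text
instance (text : String) (out : Bool) : Decidable (Spec_has_inner_uppercase text out) := by unfold Spec_has_inner_uppercase; infer_instance

-- ===== CLAIM (what is proved, stated in full; the proofs are below) =====
def Claim_equal_has_inner_uppercase : Prop := ∀ (text : String), Dom_has_inner_uppercase text → Spec_has_inner_uppercase text (has_inner_uppercase text)

-- ===== LEMMAS AND PROOFS =====

-- A's outer loop read on the char-list tokens produced by PySem.Chars.split₀
def cLoop : List (List Char) → Bool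
  | [] => false
  | t :: ts =>
    if t.length ≤ 1 then cLoop ts
    else if aScan (t.drop 1) then true
    else cLoop ts

theorem aScan_eq_any (cs : List Char) : aScan cs = cs.any PySem.Chars.isupper := by
  induction cs with
  | nil => rfl
  | cons c cs ih => cases h : PySem.Chars.isupper c <;> simp [aScan, h, ih]

theorem aLoop_map_ofList (ts : List (List Char)) :
    aLoop (ts.map String.ofList) = cLoop ts := by
  induction ts with
  | nil => rfl
  | cons t ts ih =>
      show aLoop (String.ofList t :: ts.map String.ofList) = cLoop (t :: ts)
      rw [aLoop, cLoop, ih]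
      have hlen : (PySem.Str.len (String.ofList t) ≤ 1) ↔ (t.length ≤ 1) := by
        simp only [PySem.Str.len_eq, String.toList_ofList]; omega
      have hsl : (PySem.Str.slice (String.ofList t) (some 1) none).toList = t.drop 1 := by
        simp [pysem]
      simp only [hsl]
      exact if_congr hlen rfl rfl

-- step equations for PySem.Chars.split₀.go
theorem go_nil (cur : List Char) (acc : List (List Char)) :
    PySem.Chars.split₀.go ([] : List Char) cur acc =
      (if cur.isEmpty then acc.reverse else (cur.reverse :: acc).reverse) := by
  simp [PySem.Chars.split₀.go]

theorem go_cons_space {c : Char} (cs cur : List Char) (acc : List (List Char))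
    (h : PySem.Chars.isspace c = true) :
    PySem.Chars.split₀.go (c :: cs) cur acc =
      (if cur.isEmpty then PySem.Chars.split₀.go cs [] acc
       else PySem.Chars.split₀.go cs [] (cur.reverse :: acc)) := by
  simp [PySem.Chars.split₀.go, h]

theorem go_cons_nonspace {c : Char} (cs cur : List Char) (acc : List (List Char))
    (h : PySem.Chars.isspace c = false) :
    PySem.Chars.split₀.go (c :: cs) cur acc = PySem.Chars.split₀.go cs (c :: cur) acc := by
  simp [PySem.Chars.split₀.go, h]

theorem go_acc (cs : List Char) (cur : List Char) (acc : List (List Char)) :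
    PySem.Chars.split₀.go cs cur acc = acc.reverse ++ PySem.Chars.split₀.go cs cur [] := by
  induction cs generalizing cur acc with
  | nil => rw [go_nil, go_nil]; split_ifs <;> simp
  | cons c cs ih =>
      cases h : PySem.Chars.isspace c
      · rw [go_cons_nonspace cs cur acc h, go_cons_nonspace cs cur [] h, ih]
      · rw [go_cons_space cs cur acc h, go_cons_space cs cur [] h]
        split_ifs with h1
        · exact ih _ _
        · rw [ih [] (cur.reverse :: acc), ih [] [cur.reverse]]; simp

theorem cLoop_append (l1 l2 : List (List Char)) :
    cLoop (l1 ++ l2) = (cLoop l1 || cLoop l2) := by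
  induction l1 with
  | nil => rfl
  | cons t ts ih => simp only [List.cons_append, cLoop, ih]; split_ifs <;> simp

-- the value of A's loop on the single finished token cur.reverse
theorem cLoop_single (cur : List Char) :
    cLoop [cur.reverse] = (decide (2 ≤ cur.length) && cur.dropLast.any PySem.Chars.isupper) := by
  simp only [cLoop, aScan_eq_any, List.length_reverse, List.drop_one, List.tail_reverse,
    List.any_reverse]
  by_cases h : cur.length ≤ 1
  · rw [if_pos h]
    have h2 : ¬ (2 ≤ cur.length) := by omega
    simp [h2]
  · rw [if_neg h]
    have h2 : 2 ≤ cur.length := by omega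
    simp only [h2, decide_true, Bool.true_and]
    cases ha : cur.dropLast.any PySem.Chars.isupper <;> simp

-- once the growing token already holds an inner uppercase, A's answer is true
theorem cLoop_true (cs cur : List Char) (h2 : 2 ≤ cur.length)
    (hU : cur.dropLast.any PySem.Chars.isupper = true) :
    cLoop (PySem.Chars.split₀.go cs cur []) = true := by
  induction cs generalizing cur with
  | nil =>
      have hne : cur.isEmpty = false := by cases cur <;> simp_all
      rw [go_nil, if_neg (by simp [hne])]
      rw [List.reverse_singleton]
      rw [cLoop_single, hU]
      simp [h2]
  | cons c cs ih =>
      have hne : cur.isEmpty = false := by cases cur <;> simp_all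
      have hd : (c :: cur).dropLast = c :: cur.dropLast := by
        cases cur
        · simp at h2
        · rfl
      cases h : PySem.Chars.isspace c
      · rw [go_cons_nonspace cs cur [] h]
        apply ih
        · simp only [List.length_cons]; omega
        · rw [hd]; simp [hU]
      · rw [go_cons_space cs cur [] h, if_neg (by simp [hne])]
        rw [go_acc, cLoop_append]
        rw [List.reverse_singleton]
        rw [cLoop_single, hU]
        simp [h2]

-- main invariant: B's flag-scan equals A's loop over the tokens still to be produced
theorem bGo_eq_cLoop (cs cur : List Char)
    (hU : cur.dropLast.any PySem.Chars.isupper = false) :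
    bGo cs cur.isEmpty = cLoop (PySem.Chars.split₀.go cs cur []) := by
  induction cs generalizing cur with
  | nil =>
      rw [go_nil, bGo]
      by_cases h1 : cur.isEmpty
      · rw [if_pos h1]; rfl
      · rw [if_neg h1]
        rw [List.reverse_singleton]
        rw [cLoop_single, hU]
        simp
  | cons c cs ih =>
      rw [bGo]
      cases h : PySem.Chars.isspace c
      · -- non-space character
        rw [if_neg (by simp), go_cons_nonspace cs cur [] h]
        cases cur with
        | nil =>
            rw [if_neg (by simp)]
            exact ih [c] (by simp)
        | cons a l =>
            have hd : (c :: a :: l).dropLast = c :: (a :: l).dropLast := rfl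
            cases hu : PySem.Chars.isupper c
            · rw [if_neg (by simp)]
              exact ih (c :: a :: l) (by rw [hd]; simp [hu, hU])
            · rw [if_pos (by simp)]
              symm
              apply cLoop_true
              · simp only [List.length_cons]; omega
              · rw [hd]; simp [hu]
      · -- whitespace: the current token is finished (it has no inner uppercase), flag resets
        rw [if_pos rfl, go_cons_space cs cur [] h]
        cases cur with
        | nil =>
            rw [if_pos (show (([] : List Char).isEmpty) = true from rfl)]
            exact ih [] (by simp)
        | cons a l =>
            rw [if_neg (by simp)]
            rw [go_acc, cLoop_append]
            rw [List.reverse_singleton]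
            rw [cLoop_single, hU]
            simp only [Bool.and_false, Bool.false_or]
            exact ih [] (by simp)

-- ===== VERDICT (by name: the statement is the Claim_ definition above) =====
theorem has_inner_uppercase_spec : Claim_equal_has_inner_uppercase := by
  intro text _
  unfold Spec_has_inner_uppercase has_inner_uppercase has_inner_uppercase_alt
  rw [show PySem.Str.split₀ text = (PySem.Chars.split₀ text.toList).map String.ofList from rfl]
  rw [aLoop_map_ofList]
  rw [show PySem.Chars.split₀ text.toList = PySem.Chars.split₀.go text.toList [] [] from rfl]
  have h := bGo_eq_cLoop text.toList [] (by simp)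
  exact h.symm
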